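-- pv_equiv track=rewrite | github.com/jacksund/simmate | src/simmate/toolkit/clustering/utilities.py | flatten_clusters
-- ===== SOURCE A (Python) =====
-- def flatten_clusters(clusters: list[list]) -> list[int]:
--     """
--     Takes a list of clusters of the form [[mol1, mol2, ....], [mol3, mol4, ...], ...]
--     and flattens to a list of cluster ids like [1, 1, 2, 2, ....]
--     """
--     n_entries = sum([len(c) for c in clusters])
--     column_ids = []
--     for entry_index in range(n_entries):
--         for cluster_index, cluster in enumerate(clusters):
--             if entry_index in cluster:
--                 column_ids.append(cluster_index)
--                 break
--     return column_ids
-- ===== SOURCE B (Python) =====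
-- def flatten_clusters(clusters: list[list]) -> list[int]:
--     """
--     Flatten clusters to a list of cluster ids: one pass builds an
--     entry -> first-containing-cluster index map, then emit by index.
--     """
--     first = {}
--     for cluster_index, cluster in enumerate(clusters):
--         for entry in cluster:
--             if entry not in first:
--                 first[entry] = cluster_index
--     n_entries = sum(len(c) for c in clusters)
--     return [first[i] for i in range(n_entries) if i in first]
-- ===== Notes on version B (the rewrite author's own statement) =====
-- stated objective: faster
-- what changed: B builds the entry->first-cluster-index dict in one pass over the clusters and then emits one lookup per index, instead of A's rescan of every cluster's contents for each of the n indices.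
import Mathlib
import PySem

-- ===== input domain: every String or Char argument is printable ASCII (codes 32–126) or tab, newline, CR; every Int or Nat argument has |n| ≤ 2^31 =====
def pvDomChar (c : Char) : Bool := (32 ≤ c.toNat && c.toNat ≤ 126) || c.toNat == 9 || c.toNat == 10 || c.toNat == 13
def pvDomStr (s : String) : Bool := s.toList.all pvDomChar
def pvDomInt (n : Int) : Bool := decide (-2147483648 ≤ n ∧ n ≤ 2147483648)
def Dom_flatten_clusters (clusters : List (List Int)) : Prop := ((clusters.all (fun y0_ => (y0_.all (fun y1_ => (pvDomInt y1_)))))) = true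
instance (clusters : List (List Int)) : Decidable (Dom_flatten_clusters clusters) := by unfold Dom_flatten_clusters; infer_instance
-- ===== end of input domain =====

-- B replaces A's quadratic search (for each index, rescan all clusters) by one
-- dict built in a single pass over the clusters (first occurrence wins), then a
-- lookup per index; objective: faster (asymptotic).

-- ===== PORT A =====
-- inner 'for cluster_index, cluster in enumerate(clusters): if entry in cluster: append; break'
def pvFindCluster (entry : Int) : List (Int × List Int) → Option Int
  | [] => none
  | (ci, c) :: rest => if c.contains entry then some ci else pvFindCluster entry rest

def flatten_clusters (clusters : List (List Int)) : List Int :=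
  let n_entries : Int := (clusters.map (fun c => (c.length : Int))).sum
  (PySem.List.pyRange 0 n_entries 1).foldl
    (fun column_ids entry_index =>
      match pvFindCluster entry_index (PySem.List.enumerate clusters 0) with
      | some ci => column_ids ++ [ci]
      | none => column_ids) []

-- ===== PORT B =====
-- 'for ci, cluster in enumerate(clusters): for entry in cluster: if entry not in first: first[entry] = ci'
def pvBuildFirst (clusters : List (List Int)) : PySem.Dict Int Int :=
  (PySem.List.enumerate clusters 0).foldl
    (fun d p => p.2.foldl (fun d v => if d.contains v then d else d.insert v p.1) d)
    PySem.Dict.empty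

def flatten_clusters_alt (clusters : List (List Int)) : List Int :=
  let first := pvBuildFirst clusters
  let n_entries : Int := (clusters.map (fun c => (c.length : Int))).sum
  -- comprehension '[first[i] for i in range(n_entries) if i in first]'
  (PySem.List.pyRange 0 n_entries 1).foldl
    (fun acc i =>
      match first.get? i with
      | some ci => acc ++ [ci]
      | none => acc) []

-- ===== PRECONDITION & SPEC =====
def Spec_flatten_clusters (clusters : List (List Int)) (out : List Int) : Prop := out = flatten_clusters_alt clusters
instance (clusters : List (List Int)) (out : List Int) : Decidable (Spec_flatten_clusters clusters out) := by unfold Spec_flatten_clusters; infer_instance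

-- ===== CLAIM (what is proved, stated in full; the proofs are below) =====
def Claim_equal_flatten_clusters : Prop := ∀ (clusters : List (List Int)), Dom_flatten_clusters clusters → Spec_flatten_clusters clusters (flatten_clusters clusters)

-- ===== LEMMAS AND PROOFS =====

-- inner loop over one cluster: first-wins insertion
theorem pv_inner_get? (c : List Int) (d : PySem.Dict Int Int) (ci x : Int) :
    ((c.foldl (fun d v => if d.contains v then d else d.insert v ci) d).get? x)
      = ((d.get? x).or (if c.contains x then some ci else none)) := by
  induction c generalizing d with
  | nil => simp
  | cons v rest ih =>
    simp only [List.foldl_cons, List.contains_cons]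
    by_cases hdv : d.contains v = true
    · rw [if_pos hdv, ih]
      by_cases hxv : x = v
      · subst hxv
        rw [PySem.Dict.contains_eq_isSome_get?] at hdv
        cases h : d.get? x with
        | none => rw [h] at hdv; simp at hdv
        | some w => simp
      · have hb : (x == v) = false := by simp [hxv]
        simp [hb]
    · rw [if_neg hdv, ih, PySem.Dict.get?_insert]
      by_cases hxv : x = v
      · subst hxv
        rw [PySem.Dict.contains_eq_isSome_get?] at hdv
        cases h : d.get? x with
        | none => simp
        | some w => rw [h] at hdv; simp at hdv
      · have hb : (x == v) = false := by simp [hxv]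
        simp [hxv, hb]

-- outer loop: the built dict answers like A's first-cluster scan
theorem pv_build_get? (cls : List (List Int)) (d : PySem.Dict Int Int) (s x : Int) :
    (((PySem.List.enumerate cls s).foldl
        (fun d p => p.2.foldl (fun d v => if d.contains v then d else d.insert v p.1) d) d).get? x)
      = ((d.get? x).or (pvFindCluster x (PySem.List.enumerate cls s))) := by
  induction cls generalizing d s with
  | nil => simp [PySem.List.enumerate_nil, pvFindCluster]
  | cons c rest ih =>
    rw [PySem.List.enumerate_cons]
    simp only [List.foldl_cons, pvFindCluster]
    rw [ih, pv_inner_get?]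
    rw [Option.or_assoc]
    by_cases h : x ∈ c <;> simp [h]

theorem pv_get?_eq_find (clusters : List (List Int)) (x : Int) :
    (pvBuildFirst clusters).get? x = pvFindCluster x (PySem.List.enumerate clusters 0) := by
  unfold pvBuildFirst
  rw [pv_build_get?]
  simp

-- ===== VERDICT (by name: the statement is the Claim_ definition above) =====
theorem flatten_clusters_spec : Claim_equal_flatten_clusters := by
  intro clusters _
  unfold Spec_flatten_clusters flatten_clusters flatten_clusters_alt
  simp only [pv_get?_eq_find]
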